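-- pv_equiv track=rewrite | github.com/Airlectric/A2SV_Competitive_Programming | codeforces/C_Save_More_Mice.py | numOfMice
-- ===== SOURCE A (Python) =====
-- def numOfMice(n,k,micepos):
--     micepos.sort(reverse=True)
--
--     saved = 0
--     cat_pos = 0
--
--     for pos in micepos:
--         runtime = n - pos
--         if cat_pos + runtime < n:
--             saved += 1
--             cat_pos += runtime
--     return saved
-- ===== SOURCE B (Python) =====
-- def numOfMice(n, k, micepos):
--     # Same in-place sort as A so the caller observes the identical mutation.
--     micepos.sort(reverse=True)
--     # After the descending sort the runtimes n - pos are non-decreasing and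
--     # the cat never moves backwards relative to a skipped mouse, so the saved
--     # mice are exactly the longest prefix whose cumulative runtime stays < n.
--     prefix = []
--     total = 0
--     for pos in micepos:
--         total += n - pos
--         prefix.append(total)
--     saved = 0
--     for s in prefix:
--         if s >= n:
--             break
--         saved += 1
--     return saved
-- ===== Notes on version B (the rewrite author's own statement) =====
-- stated objective: alternative
-- what changed: Replaces the conditional greedy accumulation (skip a mouse, keep looping) by building the list of cumulative runtimes in one unconditional pass and then counting the longest prefix of partial sums below n, justified by the runtimes being non-decreasing after the descending sort.
import Mathlib
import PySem

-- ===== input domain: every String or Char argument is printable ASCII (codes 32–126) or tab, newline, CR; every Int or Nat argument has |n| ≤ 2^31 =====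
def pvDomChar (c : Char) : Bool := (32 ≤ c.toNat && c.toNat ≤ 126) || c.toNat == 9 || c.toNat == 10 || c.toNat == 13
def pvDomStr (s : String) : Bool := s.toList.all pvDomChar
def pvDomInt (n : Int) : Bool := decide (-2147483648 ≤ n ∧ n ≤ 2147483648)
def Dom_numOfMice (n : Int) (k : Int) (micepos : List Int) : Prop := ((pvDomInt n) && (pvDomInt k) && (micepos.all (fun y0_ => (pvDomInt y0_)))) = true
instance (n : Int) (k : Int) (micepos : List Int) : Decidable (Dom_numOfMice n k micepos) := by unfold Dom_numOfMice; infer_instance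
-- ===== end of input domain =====

-- B builds the prefix sums of the runtimes in one unconditional pass and then
-- counts the longest prefix of partial sums below n (alternative decomposition;
-- return-value equivalence only: both sort the list argument in place in Python).
-- ===== PORT A =====
def numOfMice (n : Int) (k : Int) (micepos : List Int) : Int :=
  let sortedm := PySem.List.sorted micepos (fun x => x) true
  let st := sortedm.foldl (fun (st : Int × Int) pos =>
    let runtime := n - pos
    if st.2 + runtime < n then (st.1 + 1, st.2 + runtime) else st) (0, 0)
  st.1

-- ===== PORT B =====
-- second loop of B: count leading prefix sums below n, stopping at the first ≥ n
def pvCountBelow (n : Int) : List Int → Int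
  | [] => 0
  | s :: rest => if s ≥ n then 0 else 1 + pvCountBelow n rest

def numOfMice_alt (n : Int) (k : Int) (micepos : List Int) : Int :=
  let sortedm := PySem.List.sorted micepos (fun x => x) true
  let pref := (sortedm.foldl (fun (st : List Int × Int) pos =>
    let t := st.2 + (n - pos); (st.1 ++ [t], t)) ([], 0)).1
  pvCountBelow n pref

-- ===== PRECONDITION & SPEC =====
def Spec_numOfMice (n : Int) (k : Int) (micepos : List Int) (out : Int) : Prop := out = numOfMice_alt n k micepos
instance (n : Int) (k : Int) (micepos : List Int) (out : Int) : Decidable (Spec_numOfMice n k micepos out) := by unfold Spec_numOfMice; infer_instance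

-- ===== CLAIM (what is proved, stated in full; the proofs are below) =====
def Claim_equal_numOfMice : Prop := ∀ (n : Int) (k : Int) (micepos : List Int), Dom_numOfMice n k micepos → Spec_numOfMice n k micepos (numOfMice n k micepos)

-- ===== LEMMAS AND PROOFS =====

-- ===== VERDICT (by name: the statement is the Claim_ definition above) =====
-- prefix sums of runtimes starting from accumulator t
def pvPrefixFrom (n t : Int) : List Int → List Int
  | [] => []
  | pos :: rest => (t + (n - pos)) :: pvPrefixFrom n (t + (n - pos)) rest

lemma prefix_foldl (n : Int) (xs : List Int) : ∀ (acc : List Int) (t : Int),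
    (xs.foldl (fun (st : List Int × Int) pos =>
      (st.1 ++ [st.2 + (n - pos)], st.2 + (n - pos))) (acc, t)).1
    = acc ++ pvPrefixFrom n t xs := by
  induction xs with
  | nil => intro acc t; simp [pvPrefixFrom]
  | cons pos rest ih =>
    intro acc t
    simp only [List.foldl, pvPrefixFrom]
    rw [ih]
    simp

lemma greedy_skip (n : Int) (xs : List Int) : ∀ (s c : Int),
    (∀ x ∈ xs, x ≤ c) →
    (xs.foldl (fun (st : Int × Int) pos =>
      if st.2 + (n - pos) < n then (st.1 + 1, st.2 + (n - pos)) else st) (s, c)).1 = s := by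
  induction xs with
  | nil => intro s c _; rfl
  | cons pos rest ih =>
    intro s c h
    have hpos : pos ≤ c := h pos (by simp)
    have hcond : ¬ (c + (n - pos) < n) := by omega
    simp only [List.foldl, if_neg hcond]
    exact ih s c (fun x hx => h x (List.mem_cons_of_mem _ hx))

lemma greedy_eq_count (n : Int) (xs : List Int)
    (hx : xs.Pairwise (fun a b => b ≤ a)) : ∀ (s c : Int),
    (xs.foldl (fun (st : Int × Int) pos =>
      if st.2 + (n - pos) < n then (st.1 + 1, st.2 + (n - pos)) else st) (s, c)).1
    = s + pvCountBelow n (pvPrefixFrom n c xs) := by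
  induction xs with
  | nil => intro s c; simp [pvPrefixFrom, pvCountBelow]
  | cons pos rest ih =>
    intro s c
    rcases List.pairwise_cons.mp hx with ⟨hhead, htail⟩
    by_cases hcond : c + (n - pos) < n
    · simp only [List.foldl, pvPrefixFrom, pvCountBelow, if_pos hcond, if_neg (by omega : ¬ c + (n - pos) ≥ n)]
      rw [ih htail (s+1) (c + (n - pos))]
      ring
    · have hge : c + (n - pos) ≥ n := by omega
      simp only [List.foldl, pvPrefixFrom, pvCountBelow, if_neg hcond, if_pos hge]
      have : ∀ x ∈ rest, x ≤ c := fun x hx' => by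
        have := hhead x hx'; omega
      rw [greedy_skip n rest s c this]
      ring

theorem numOfMice_spec : Claim_equal_numOfMice := by
  intro n k micepos _
  unfold Spec_numOfMice numOfMice numOfMice_alt
  dsimp only
  rw [prefix_foldl n _ [] 0, List.nil_append,
    greedy_eq_count n _ (PySem.List.sorted_pairwise_rev micepos (fun x => x)) 0 0, zero_add]
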